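-- pv_equiv track=rewrite | github.com/d-gangz/chunking-expt | 4_labelled_dataset/baseline-ques-v3/verify_source_quotes.py | map_transcript_titles
-- ===== SOURCE A (Python) =====
-- from typing import Dict, List, Tuple
--
-- def map_transcript_titles(source_title: str, available_transcripts: Dict[str, str]) -> str:
--     """Map source title to available transcript title."""
--     # Clean the source title
--     clean_source = source_title.replace("TRANSCRIPT ", "").split(": ", 1)[-1].strip()
--
--     # Try exact match first
--     for title in available_transcripts.keys():
--         if clean_source.lower() == title.lower():
--             return title
--
--     # Try partial matches
--     for title in available_transcripts.keys():
--         if clean_source.lower() in title.lower() or title.lower() in clean_source.lower():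
--             return title
--
--     return None
-- ===== SOURCE B (Python) =====
-- def map_transcript_titles(source_title, available_transcripts):
--     """Map source title to available transcript title (single pass with fallback)."""
--     clean_source = source_title.replace("TRANSCRIPT ", "").split(": ", 1)[-1].strip()
--     cl = clean_source.lower()
--     partial = None
--     for title in available_transcripts.keys():
--         tl = title.lower()
--         if cl == tl:
--             return title
--         if partial is None and (cl in tl or tl in cl):
--             partial = title
--     return partial
-- ===== Notes on version B (the rewrite author's own statement) =====
-- stated objective: faster
-- what changed: Replaces A's two sequential scans over the keys (exact pass, then partial pass) by a single pass that returns on the first exact match while remembering the first partial match as a fallback, and lowercases the cleaned source title once instead of recomputing it for every key.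
import Mathlib
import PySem

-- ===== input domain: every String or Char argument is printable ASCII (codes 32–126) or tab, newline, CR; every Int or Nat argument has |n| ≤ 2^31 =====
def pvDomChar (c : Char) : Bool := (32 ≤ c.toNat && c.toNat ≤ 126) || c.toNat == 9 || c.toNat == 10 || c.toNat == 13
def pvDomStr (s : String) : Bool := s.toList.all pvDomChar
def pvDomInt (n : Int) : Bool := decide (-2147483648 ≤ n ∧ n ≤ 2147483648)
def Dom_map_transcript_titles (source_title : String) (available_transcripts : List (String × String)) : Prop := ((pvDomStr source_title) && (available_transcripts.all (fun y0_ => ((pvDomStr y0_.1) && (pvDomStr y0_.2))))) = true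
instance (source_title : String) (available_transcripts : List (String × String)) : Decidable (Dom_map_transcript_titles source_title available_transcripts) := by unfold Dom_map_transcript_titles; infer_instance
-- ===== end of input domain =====

-- B collapses A's two ordered passes (exact match, then partial match) into one pass that
-- remembers the first partial match as a fallback, lowercasing the cleaned source once instead of per key.

-- ===== PORT A =====
-- clean_source = source_title.replace("TRANSCRIPT ", "").split(": ", 1)[-1].strip()
def pvCleanA (source_title : String) : String :=
  PySem.Str.strip
    ((((PySem.Str.splitMax? (PySem.Str.replace source_title "TRANSCRIPT " "") ": " 1).getD []).getLast?).getD "")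

def map_transcript_titles (source_title : String) (available_transcripts : List (String × String)) : Option String :=
  let clean_source := pvCleanA source_title
  -- exact-match pass
  match available_transcripts.find? (fun p => PySem.Str.lower clean_source == PySem.Str.lower p.1) with
  | some p => some p.1
  | none =>
    -- partial-match pass
    match available_transcripts.find? (fun p =>
        PySem.Str.isIn (PySem.Str.lower clean_source) (PySem.Str.lower p.1) ||
        PySem.Str.isIn (PySem.Str.lower p.1) (PySem.Str.lower clean_source)) with
    | some p => some p.1
    | none => none

-- ===== PORT B =====
-- clean_source computed the same way (pvCleanA), lowered ONCE, then a single loop carrying the fallback `partial`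
def pvAltLoop (cl : String) : List (String × String) → Option String → Option String
  | [], part => part
  | (t, _) :: rest, part =>
      let tl := PySem.Str.lower t
      if cl == tl then some t
      else pvAltLoop cl rest
        (if part.isNone && (PySem.Str.isIn cl tl || PySem.Str.isIn tl cl) then some t else part)

def map_transcript_titles_alt (source_title : String) (available_transcripts : List (String × String)) : Option String :=
  let clean_source := pvCleanA source_title
  pvAltLoop (PySem.Str.lower clean_source) available_transcripts none

-- ===== PRECONDITION & SPEC =====
def Spec_map_transcript_titles (source_title : String) (available_transcripts : List (String × String)) (out : Option String) : Prop := out = map_transcript_titles_alt source_title available_transcripts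
instance (source_title : String) (available_transcripts : List (String × String)) (out : Option String) : Decidable (Spec_map_transcript_titles source_title available_transcripts out) := by unfold Spec_map_transcript_titles; infer_instance

-- ===== CLAIM (what is proved, stated in full; the proofs are below) =====
def Claim_equal_map_transcript_titles : Prop := ∀ (source_title : String) (available_transcripts : List (String × String)), Dom_map_transcript_titles source_title available_transcripts → Spec_map_transcript_titles source_title available_transcripts (map_transcript_titles source_title available_transcripts)

-- ===== LEMMAS AND PROOFS =====

-- characterisation of B's single loop by A's two passes
theorem pvAltLoop_eq (cl : String) (l : List (String × String)) (part : Option String) :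
    pvAltLoop cl l part =
      match l.find? (fun p => cl == PySem.Str.lower p.1) with
      | some p => some p.1
      | none =>
        match part with
        | some x => some x
        | none =>
          (l.find? (fun p => PySem.Str.isIn cl (PySem.Str.lower p.1) ||
                             PySem.Str.isIn (PySem.Str.lower p.1) cl)).map Prod.fst := by
  induction l generalizing part with
  | nil => cases part <;> rfl
  | cons hd tl ih =>
    obtain ⟨t, v⟩ := hd
    by_cases hex : (cl == PySem.Str.lower t) = true
    · simp [pvAltLoop, List.find?, hex]
    · simp only [Bool.not_eq_true] at hex
      cases part with
      | some x =>
        simp [pvAltLoop, List.find?, hex, ih]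
      | none =>
        by_cases h1 : PySem.Chars.isIn cl.toList (PySem.Chars.lower t.toList) = true <;>
        by_cases h2 : PySem.Chars.isIn (PySem.Chars.lower t.toList) cl.toList = true <;>
        simp [pvAltLoop, List.find?, hex, h1, h2, ih]

-- ===== VERDICT (by name: the statement is the Claim_ definition above) =====
theorem map_transcript_titles_spec : Claim_equal_map_transcript_titles := by
  intro source_title ts _
  unfold Spec_map_transcript_titles
  simp only [map_transcript_titles, map_transcript_titles_alt]
  rw [pvAltLoop_eq]
  cases hf : ts.find? (fun p => PySem.Str.lower (pvCleanA source_title) == PySem.Str.lower p.1) with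
  | some p => simp
  | none =>
    cases hg : ts.find? (fun p =>
        PySem.Str.isIn (PySem.Str.lower (pvCleanA source_title)) (PySem.Str.lower p.1) ||
        PySem.Str.isIn (PySem.Str.lower p.1) (PySem.Str.lower (pvCleanA source_title))) with
    | some p => simp
    | none => simp
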